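-- pv_equiv track=rewrite | github.com/DevTerraX/Finance_tg_bot | data/utils/csv_export.py | _to_strftime
-- ===== SOURCE A (Python) =====
-- def _to_strftime(pattern: str) -> str:
--     """
--     Преобразует пользовательский шаблон даты (DD.MM.YYYY) в формат strftime.
--     """
--     mapping = {
--         'DD': '%d',
--         'MM': '%m',
--         'YYYY': '%Y'
--     }
--     result = pattern
--     for key, value in mapping.items():
--         result = result.replace(key, value)
--     return result
-- ===== SOURCE B (Python) =====
-- def _to_strftime(pattern: str) -> str:
--     """Single left-to-right scan resolving each token where it occurs."""
--     mapping = {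
--         'YYYY': '%Y',
--         'MM': '%m',
--         'DD': '%d'
--     }
--     out = []
--     i = 0
--     n = len(pattern)
--     while i < n:
--         for tok in ('YYYY', 'MM', 'DD'):
--             if pattern.startswith(tok, i):
--                 out.append(mapping[tok])
--                 i += len(tok)
--                 break
--         else:
--             out.append(pattern[i])
--             i += 1
--     return ''.join(out)
-- ===== Notes on version B (the rewrite author's own statement) =====
-- stated objective: alternative
-- what changed: Replaces the three sequential full-string str.replace passes by a single left-to-right scan that resolves YYYY/MM/DD tokens as they are encountered and builds the output once.
import Mathlib
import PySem

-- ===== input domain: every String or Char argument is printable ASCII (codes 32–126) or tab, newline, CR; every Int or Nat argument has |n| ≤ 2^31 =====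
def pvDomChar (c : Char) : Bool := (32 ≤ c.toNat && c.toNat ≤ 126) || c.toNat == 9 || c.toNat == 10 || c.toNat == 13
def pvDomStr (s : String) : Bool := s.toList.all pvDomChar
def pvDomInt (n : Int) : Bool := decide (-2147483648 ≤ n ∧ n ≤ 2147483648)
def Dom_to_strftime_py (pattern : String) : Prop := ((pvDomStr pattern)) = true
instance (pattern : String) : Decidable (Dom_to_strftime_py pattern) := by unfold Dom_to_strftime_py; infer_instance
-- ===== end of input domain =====

-- B replaces A's three sequential full-string replace passes by one left-to-right
-- token scan (objective: alternative single-pass formulation, same result).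

-- ===== PORT A =====
-- result = pattern; for key, value in mapping.items(): result = result.replace(key, value)
def to_strftime_py (pattern : String) : String :=
  let result := pattern
  let result := PySem.Str.replace result "DD" "%d"
  let result := PySem.Str.replace result "MM" "%m"
  let result := PySem.Str.replace result "YYYY" "%Y"
  result

-- ===== PORT B =====
-- Source B's while-loop over the index, trying the tokens 'YYYY', 'MM', 'DD' in order
-- at the current position, else copying one character; recursion over the
-- remaining characters stands for the advancing index.
def pvScanB : List Char → List Char
  | 'Y' :: 'Y' :: 'Y' :: 'Y' :: t => '%' :: 'Y' :: pvScanB t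
  | 'M' :: 'M' :: t => '%' :: 'm' :: pvScanB t
  | 'D' :: 'D' :: t => '%' :: 'd' :: pvScanB t
  | c :: t => c :: pvScanB t
  | [] => []

def to_strftime_py_alt (pattern : String) : String :=
  String.ofList (pvScanB pattern.toList)

-- ===== PRECONDITION & SPEC =====
def Spec_to_strftime_py (pattern : String) (out : String) : Prop := out = to_strftime_py_alt pattern
instance (pattern : String) (out : String) : Decidable (Spec_to_strftime_py pattern out) := by unfold Spec_to_strftime_py; infer_instance

-- ===== CLAIM (what is proved, stated in full; the proofs are below) =====
def Claim_equal_to_strftime_py : Prop := ∀ (pattern : String), Dom_to_strftime_py pattern → Spec_to_strftime_py pattern (to_strftime_py pattern)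

-- ===== LEMMAS AND PROOFS =====

-- structural characterisations of the three replace passes
def pvReplDD : List Char → List Char
  | 'D' :: 'D' :: t => '%' :: 'd' :: pvReplDD t
  | c :: t => c :: pvReplDD t
  | [] => []

def pvReplMM : List Char → List Char
  | 'M' :: 'M' :: t => '%' :: 'm' :: pvReplMM t
  | c :: t => c :: pvReplMM t
  | [] => []

def pvReplYYYY : List Char → List Char
  | 'Y' :: 'Y' :: 'Y' :: 'Y' :: t => '%' :: 'Y' :: pvReplYYYY t
  | c :: t => c :: pvReplYYYY t
  | [] => []

-- fused single pass for the two 2-character tokens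
def pvScanMD : List Char → List Char
  | 'M' :: 'M' :: t => '%' :: 'm' :: pvScanMD t
  | 'D' :: 'D' :: t => '%' :: 'd' :: pvScanMD t
  | c :: t => c :: pvScanMD t
  | [] => []

lemma pv_go_eq (old new : List Char) (f : List Char → List Char)
    (h1 : 1 ≤ old.length)
    (hnil : f [] = [])
    (hcons : ∀ c t, f (c :: t) =
      if old.isPrefixOf (c :: t) then new ++ f (List.drop old.length (c :: t)) else c :: f t) :
    ∀ fuel l acc, l.length ≤ fuel →
      PySem.Chars.replace.go old new fuel l acc = acc.reverse ++ f l := by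
  intro fuel
  induction fuel with
  | zero =>
    intro l acc hl
    cases l with
    | nil => simp [PySem.Chars.replace.go, hnil]
    | cons c t => simp at hl
  | succ n ih =>
    intro l acc hl
    cases l with
    | nil => simp [PySem.Chars.replace.go, hnil]
    | cons c t =>
      rw [PySem.Chars.replace.go]
      by_cases hp : old.isPrefixOf (c :: t)
      · simp only [hp, if_true]
        rw [ih _ _ (by simp at hl ⊢; omega)]
        rw [hcons c t]
        simp [hp]
      · simp only [hp]
        rw [ih t (c :: acc) (by simp at hl; omega)]
        rw [hcons c t]
        simp [hp]

lemma pv_replace_DD (l : List Char) :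
    PySem.Chars.replace l ['D', 'D'] ['%', 'd'] = pvReplDD l := by
  rw [PySem.Chars.replace]
  simp only [List.isEmpty_cons, if_false, Bool.false_eq_true]
  rw [pv_go_eq ['D', 'D'] ['%', 'd'] pvReplDD (by simp) rfl ?_ l.length l [] le_rfl]
  · simp
  · intro c t
    rw [pvReplDD.eq_def]
    rcases t with _ | ⟨b, u⟩
    · split <;> simp_all [List.isPrefixOf]
    · split <;> simp_all [List.isPrefixOf] <;> aesop

lemma pv_replace_MM (l : List Char) :
    PySem.Chars.replace l ['M', 'M'] ['%', 'm'] = pvReplMM l := by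
  rw [PySem.Chars.replace]
  simp only [List.isEmpty_cons, if_false, Bool.false_eq_true]
  rw [pv_go_eq ['M', 'M'] ['%', 'm'] pvReplMM (by simp) rfl ?_ l.length l [] le_rfl]
  · simp
  · intro c t
    rw [pvReplMM.eq_def]
    rcases t with _ | ⟨b, u⟩
    · split <;> simp_all [List.isPrefixOf]
    · split <;> simp_all [List.isPrefixOf] <;> aesop

lemma pv_replace_YYYY (l : List Char) :
    PySem.Chars.replace l ['Y', 'Y', 'Y', 'Y'] ['%', 'Y'] = pvReplYYYY l := by
  rw [PySem.Chars.replace]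
  simp only [List.isEmpty_cons, if_false, Bool.false_eq_true]
  rw [pv_go_eq ['Y', 'Y', 'Y', 'Y'] ['%', 'Y'] pvReplYYYY (by simp) rfl ?_ l.length l [] le_rfl]
  · simp
  · intro c t
    rw [pvReplYYYY.eq_def]
    rcases t with _ | ⟨b, _ | ⟨e, _ | ⟨g, u⟩⟩⟩
    · split <;> simp_all [List.isPrefixOf]
    · split <;> simp_all [List.isPrefixOf]
    · split <;> simp_all [List.isPrefixOf]
    · split <;> simp_all [List.isPrefixOf] <;> aesop

lemma pv_head_replDD (u : List Char) :
    (pvReplDD u).head? = u.head? ∨ (pvReplDD u).head? = some '%' := by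
  rw [pvReplDD.eq_def]; split <;> simp

lemma pv_prefixY_scanMD (u : List Char) :
    ∀ k : Nat, List.replicate k 'Y' <+: pvScanMD u → List.replicate k 'Y' <+: u := by
  induction u using pvScanMD.induct with
  | case1 t ih =>
    intro k hk
    cases k with
    | zero => simp
    | succ j =>
      rw [pvScanMD] at hk
      rw [List.replicate_succ, List.cons_prefix_cons] at hk
      exact absurd hk.1 (by decide)
  | case2 t ih =>
    intro k hk
    cases k with
    | zero => simp
    | succ j =>
      rw [pvScanMD] at hk
      rw [List.replicate_succ, List.cons_prefix_cons] at hk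
      exact absurd hk.1 (by decide)
  | case3 c t h1 h2 ih =>
    intro k hk
    cases k with
    | zero => simp
    | succ j =>
      have hstep : pvScanMD (c :: t) = c :: pvScanMD t := by
        rw [pvScanMD.eq_def]
        split
        · rename_i tt heq; injection heq with e1 e2; exact ((h1 tt e1 e2).elim)
        · rename_i tt heq; injection heq with e1 e2; exact ((h2 tt e1 e2).elim)
        · rename_i heq; injection heq with e1 e2; subst e1; subst e2; rfl
        · simp_all
      rw [hstep] at hk
      rw [List.replicate_succ, List.cons_prefix_cons] at hk
      rw [List.replicate_succ, List.cons_prefix_cons]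
      exact ⟨hk.1, ih _ hk.2⟩
  | case4 => intro k hk; simpa [pvScanMD] using hk

-- stage 1: the two 2-character passes fuse into one scan
lemma pv_stage1 (l : List Char) : pvReplMM (pvReplDD l) = pvScanMD l := by
  induction l using pvScanMD.induct with
  | case1 t ih => simp [pvReplDD, pvReplMM, pvScanMD, ih]
  | case2 t ih => simp [pvReplDD, pvReplMM, pvScanMD, ih]
  | case3 c t h1 h2 ih =>
    have hDD : pvReplDD (c :: t) = c :: pvReplDD t := by
      rw [pvReplDD.eq_def]
      split
      · rename_i tt heq; injection heq with e1 e2; exact ((h2 tt e1 e2).elim)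
      · rename_i heq; injection heq with e1 e2; subst e1; subst e2; rfl
      · simp_all
    have hMD : pvScanMD (c :: t) = c :: pvScanMD t := by
      rw [pvScanMD.eq_def]
      split
      · rename_i tt heq; injection heq with e1 e2; exact ((h1 tt e1 e2).elim)
      · rename_i tt heq; injection heq with e1 e2; exact ((h2 tt e1 e2).elim)
      · rename_i heq; injection heq with e1 e2; subst e1; subst e2; rfl
      · simp_all
    rw [hDD, hMD, ← ih]
    rw [pvReplMM.eq_def]
    split
    · rename_i tt heq
      injection heq with e1 e2
      have hthis : t.head? ≠ some 'M' := by
        intro ht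
        rcases t with _ | ⟨b, u⟩
        · simp at ht
        · simp at ht; subst ht; exact h1 u e1 rfl
      have hhd : (pvReplDD t).head? = some 'M' := by rw [e2]; rfl
      rcases pv_head_replDD t with h | h <;> rw [hhd] at h
      · exact absurd h.symm hthis
      · exact absurd h (by decide)
    · rename_i heq; injection heq with e1 e2; subst e1; subst e2; rfl
    · simp_all
  | case4 => simp [pvReplDD, pvReplMM, pvScanMD]

-- stage 2: the YYYY pass over the fused scan is the full single pass
lemma pv_stage2 (l : List Char) : pvReplYYYY (pvScanMD l) = pvScanB l := by
  induction l using pvScanB.induct with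
  | case1 t ih =>
    show pvReplYYYY (pvScanMD ('Y' :: 'Y' :: 'Y' :: 'Y' :: t)) = pvScanB _
    simp [pvScanMD, pvScanB, pvReplYYYY, ih]
  | case2 t ih => simp [pvScanMD, pvScanB, pvReplYYYY, ih]
  | case3 t ih => simp [pvScanMD, pvScanB, pvReplYYYY, ih]
  | case4 c t h1 h2 h3 ih =>
    have hMD : pvScanMD (c :: t) = c :: pvScanMD t := by
      rw [pvScanMD.eq_def]
      split
      · rename_i tt heq; injection heq with e1 e2; exact ((h2 tt e1 e2).elim)
      · rename_i tt heq; injection heq with e1 e2; exact ((h3 tt e1 e2).elim)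
      · rename_i heq; injection heq with e1 e2; subst e1; subst e2; rfl
      · simp_all
    have hB : pvScanB (c :: t) = c :: pvScanB t := by
      rw [pvScanB.eq_def]
      split
      · rename_i tt heq; injection heq with e1 e2; exact ((h1 tt e1 e2).elim)
      · rename_i tt heq; injection heq with e1 e2; exact ((h2 tt e1 e2).elim)
      · rename_i tt heq; injection heq with e1 e2; exact ((h3 tt e1 e2).elim)
      · rename_i heq; injection heq with e1 e2; subst e1; subst e2; rfl
      · simp_all
    rw [hMD, hB, ← ih]
    rw [pvReplYYYY.eq_def]
    split
    · rename_i tt heq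
      injection heq with e1 e2
      have hnt : ¬ List.replicate 3 'Y' <+: t := by
        intro ⟨u, hu⟩
        simp [List.replicate] at hu
        exact h1 u e1 hu.symm
      have hpre : List.replicate 3 'Y' <+: pvScanMD t := by
        rw [e2]; exact ⟨tt, by simp [List.replicate]⟩
      exact absurd (pv_prefixY_scanMD t 3 hpre) hnt
    · rename_i heq; injection heq with e1 e2; subst e1; subst e2; rfl
    · simp_all
  | case5 => simp [pvScanMD, pvScanB, pvReplYYYY]

-- ===== VERDICT (by name: the statement is the Claim_ definition above) =====
theorem to_strftime_py_spec : Claim_equal_to_strftime_py := by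
  intro pattern _
  unfold Spec_to_strftime_py to_strftime_py to_strftime_py_alt
  simp only [PySem.Str.replace]
  rw [String.toList_ofList, String.toList_ofList]
  rw [show ("DD" : String).toList = ['D', 'D'] from rfl,
      show ("%d" : String).toList = ['%', 'd'] from rfl,
      show ("MM" : String).toList = ['M', 'M'] from rfl,
      show ("%m" : String).toList = ['%', 'm'] from rfl,
      show ("YYYY" : String).toList = ['Y', 'Y', 'Y', 'Y'] from rfl,
      show ("%Y" : String).toList = ['%', 'Y'] from rfl]
  rw [pv_replace_DD, pv_replace_MM, pv_replace_YYYY, pv_stage1, pv_stage2]
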